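-- pv_equiv track=rewrite | github.com/siebeniris/QuantifyingLanguageConfusion | src/languageConfusion/preprocessing_for_regression.py | get_lang2lang_lr_dict
-- ===== SOURCE A (Python) =====
-- from itertools import product
--
-- script_writting={
--     'amh_Ethi': 'LTR',
--     'cmn_Hani': 'LTR',
--     'deu_Latn': 'LTR',
--     'fin_Latn': 'LTR',
--     'guj_Gujr': 'LTR',
--     'hin_Deva': 'LTR',
--     'hun_Latn': 'LTR',
--     'jpn_Jpan': 'LTR',
--     'kaz_Cyrl': 'LTR',
--     'kor_Hang': 'LTR',
--     'mhr_Cyrl': 'LTR',  # mari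
--     'mlt_Latn': 'LTR',
--     'mon_Cyrl': 'LTR',
--     'pan_Guru': 'LTR',
--     'sin_Sinh': 'LTR',
--     'tur_Latn': 'LTR',
--
--     'urd_Arab': 'RTL',
--     'heb_Hebr': 'RTL',
--     'arb_Arab': 'RTL',
--     'ydd_Hebr': 'RTL'
-- }
--
-- def get_lang2lang_lr_dict(eval_langs_list):
--     """
--     Get whether two languages are written in the same order of script, ltr or rtl
--     """
--     lang2lang_lr = dict()
--     for lang1, lang2 in product(eval_langs_list, repeat=2):
--
--         if lang1 not in lang2lang_lr:
--             lang2lang_lr[lang1] = dict()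
--
--         if script_writting[lang1] == script_writting[lang2]:
--             lang2lang_lr[lang1][lang2] = 1
--         else:
--             lang2lang_lr[lang1][lang2] = 0
--     return lang2lang_lr
-- ===== SOURCE B (Python) =====
-- from itertools import product
--
-- script_writting={
--     'amh_Ethi': 'LTR',
--     'cmn_Hani': 'LTR',
--     'deu_Latn': 'LTR',
--     'fin_Latn': 'LTR',
--     'guj_Gujr': 'LTR',
--     'hin_Deva': 'LTR',
--     'hun_Latn': 'LTR',
--     'jpn_Jpan': 'LTR',
--     'kaz_Cyrl': 'LTR',
--     'kor_Hang': 'LTR',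
--     'mhr_Cyrl': 'LTR',
--     'mlt_Latn': 'LTR',
--     'mon_Cyrl': 'LTR',
--     'pan_Guru': 'LTR',
--     'sin_Sinh': 'LTR',
--     'tur_Latn': 'LTR',
--     'urd_Arab': 'RTL',
--     'heb_Hebr': 'RTL',
--     'arb_Arab': 'RTL',
--     'ydd_Hebr': 'RTL'
-- }
--
-- def get_lang2lang_lr_dict(eval_langs_list):
--     """
--     Get whether two languages are written in the same order of script, ltr or rtl
--     """
--     row_ltr = {l2: 1 if script_writting[l2] == 'LTR' else 0 for l2 in eval_langs_list}
--     row_rtl = {l2: 1 if script_writting[l2] == 'RTL' else 0 for l2 in eval_langs_list}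
--     return {l1: dict(row_ltr) if script_writting[l1] == 'LTR' else dict(row_rtl)
--             for l1 in eval_langs_list}
-- ===== Notes on version B (the rewrite author's own statement) =====
-- stated objective: faster
-- what changed: Instead of iterating all n^2 ordered pairs and comparing script directions pairwise, B builds the two possible inner rows (LTR-template and RTL-template) in one pass each and then assigns a copy of the matching template to every outer language, eliminating the pairwise comparison loop.
import Mathlib
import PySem

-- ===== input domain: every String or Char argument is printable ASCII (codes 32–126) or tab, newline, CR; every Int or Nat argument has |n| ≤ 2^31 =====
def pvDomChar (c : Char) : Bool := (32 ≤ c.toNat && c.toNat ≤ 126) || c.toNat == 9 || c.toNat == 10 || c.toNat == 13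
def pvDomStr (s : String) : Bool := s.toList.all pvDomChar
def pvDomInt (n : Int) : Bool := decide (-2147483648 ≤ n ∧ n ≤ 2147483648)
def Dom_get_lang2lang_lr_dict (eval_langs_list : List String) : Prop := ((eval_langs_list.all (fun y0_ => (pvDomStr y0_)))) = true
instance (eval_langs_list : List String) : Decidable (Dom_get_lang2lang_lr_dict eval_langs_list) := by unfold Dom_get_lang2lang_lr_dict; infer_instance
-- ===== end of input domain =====

-- B replaces A's n² pairwise script comparisons by two precomputed template rows copied per
-- outer language (objective: faster).

-- the module-level table script_writting
def pvScript : PySem.Dict String String := PySem.Dict.ofList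
  [("amh_Ethi", "LTR"), ("cmn_Hani", "LTR"), ("deu_Latn", "LTR"), ("fin_Latn", "LTR"),
   ("guj_Gujr", "LTR"), ("hin_Deva", "LTR"), ("hun_Latn", "LTR"), ("jpn_Jpan", "LTR"),
   ("kaz_Cyrl", "LTR"), ("kor_Hang", "LTR"), ("mhr_Cyrl", "LTR"), ("mlt_Latn", "LTR"),
   ("mon_Cyrl", "LTR"), ("pan_Guru", "LTR"), ("sin_Sinh", "LTR"), ("tur_Latn", "LTR"),
   ("urd_Arab", "RTL"), ("heb_Hebr", "RTL"), ("arb_Arab", "RTL"), ("ydd_Hebr", "RTL")]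

-- ===== PORT A =====
-- product(l, repeat=2) enumerated as a flatMap; the per-pair body is transcribed literally.
def get_lang2lang_lr_dict (eval_langs_list : List String) : List (String × List (String × Int)) :=
  let pairs := eval_langs_list.flatMap (fun a => eval_langs_list.map (fun b => (a, b)))
  let d := pairs.foldl
    (fun (d : PySem.Dict String (PySem.Dict String Int)) (p : String × String) =>
      let d := if d.contains p.1 then d else d.insert p.1 PySem.Dict.empty
      d.insert p.1 ((d.getD p.1 PySem.Dict.empty).insert p.2
        (if pvScript.get? p.1 == pvScript.get? p.2 then (1 : Int) else 0)))
    PySem.Dict.empty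
  d.items.map (fun q => (q.1, q.2.items))

-- ===== PORT B =====
def get_lang2lang_lr_dict_alt (eval_langs_list : List String) : List (String × List (String × Int)) :=
  let rowLTR : PySem.Dict String Int := eval_langs_list.foldl
    (fun r x => r.insert x (if pvScript.get? x == some "LTR" then (1 : Int) else 0)) PySem.Dict.empty
  let rowRTL : PySem.Dict String Int := eval_langs_list.foldl
    (fun r x => r.insert x (if pvScript.get? x == some "RTL" then (1 : Int) else 0)) PySem.Dict.empty
  let outer : PySem.Dict String (PySem.Dict String Int) := eval_langs_list.foldl
    (fun d x => d.insert x (if pvScript.get? x == some "LTR" then rowLTR else rowRTL)) PySem.Dict.empty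
  outer.items.map (fun q => (q.1, q.2.items))

-- ===== PRECONDITION & SPEC =====
-- Pre_ excludes exactly the lists containing a language missing from script_writting,
-- on which Python A raises KeyError.
def Pre_get_lang2lang_lr_dict (eval_langs_list : List String) : Prop :=
  ∀ s ∈ eval_langs_list, pvScript.get? s = some "LTR" ∨ pvScript.get? s = some "RTL"
instance (eval_langs_list : List String) : Decidable (Pre_get_lang2lang_lr_dict eval_langs_list) := by
  unfold Pre_get_lang2lang_lr_dict; infer_instance

def pvWitness_get_lang2lang_lr_dict : List String := ["deu_Latn", "arb_Arab", "tur_Latn"]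

def Spec_get_lang2lang_lr_dict (eval_langs_list : List String) (out : List (String × List (String × Int))) : Prop := out = get_lang2lang_lr_dict_alt eval_langs_list
instance (eval_langs_list : List String) (out : List (String × List (String × Int))) : Decidable (Spec_get_lang2lang_lr_dict eval_langs_list out) := by unfold Spec_get_lang2lang_lr_dict; infer_instance

-- ===== CLAIM (what is proved, stated in full; the proofs are below) =====
def Claim_equal_get_lang2lang_lr_dict : Prop := ∀ (eval_langs_list : List String), Dom_get_lang2lang_lr_dict eval_langs_list → Pre_get_lang2lang_lr_dict eval_langs_list → Spec_get_lang2lang_lr_dict eval_langs_list (get_lang2lang_lr_dict eval_langs_list)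

-- ===== LEMMAS AND PROOFS =====

-- script lookup, pairwise value, and the generic "row" fold shared by the reasoning
def pvSg (s : String) : Option String := pvScript.get? s
def pvVal (a b : String) : Int := if pvSg a == pvSg b then 1 else 0
def pvRow (v : String → Int) (L : List String) (r : PySem.Dict String Int) : PySem.Dict String Int :=
  L.foldl (fun r b => r.insert b (v b)) r
def pvTarget (L : List String) (a : String) : PySem.Dict String Int :=
  pvRow (pvVal a) L PySem.Dict.empty

-- a foldl of inserts whose value depends only on the key: final lookup
theorem pv_get?_foldl_insert_fn {ν : Type} (f : String → ν) :
    ∀ (m : List String) (d : PySem.Dict String ν) (k : String),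
      (m.foldl (fun d x => d.insert x (f x)) d).get? k
        = if k ∈ m then some (f k) else d.get? k := by
  intro m
  induction m with
  | nil => intro d k; simp
  | cons a m ih =>
    intro d k
    simp only [List.foldl_cons, ih, List.mem_cons]
    by_cases hm : k ∈ m
    · simp [hm]
    · by_cases hk : k = a
      · subst hk; simp [hm, PySem.Dict.get?_insert_self]
      · simp [hm, hk, PySem.Dict.get?_insert_of_ne _ _ hk]

theorem pv_get?_pvRow (v : String → Int) (L : List String) (r : PySem.Dict String Int) (k : String) :
    (pvRow v L r).get? k = if k ∈ L then some (v k) else r.get? k :=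
  pv_get?_foldl_insert_fn v L r k

-- inserting a binding a dict (with unique keys) already holds is a no-op
theorem pv_insert_eq_self {ν : Type} (d : PySem.Dict String ν) (k : String) (w : ν)
    (hnd : d.keys.Nodup) (h : d.get? k = some w) : d.insert k w = d := by
  apply PySem.Dict.ext
  have hc : d.contains k = true := by
    rw [PySem.Dict.contains_eq_isSome_get?, h]; rfl
  have h' : ∀ p ∈ d.items, (if (p.1 == k) = true then (k, w) else p) = p := by
    intro p hp
    by_cases hpk : p.1 = k
    · obtain ⟨p1, p2⟩ := p
      simp only at hpk
      subst hpk
      have h2 := PySem.Dict.get?_of_mem_items d hp hnd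
      rw [h] at h2
      simp_all
    · simp [hpk]
  rw [PySem.Dict.items_insert_of_contains d w hc, List.map_congr_left h', List.map_id']

-- re-running a row update whose bindings are already present changes nothing
theorem pv_pvRow_idem (v : String → Int) (L : List String) :
    ∀ (r : PySem.Dict String Int), r.keys.Nodup → (∀ b ∈ L, r.get? b = some (v b)) →
      pvRow v L r = r := by
  induction L with
  | nil => intro r _ _; rfl
  | cons b L ih =>
    intro r hnd h
    have hb : r.insert b (v b) = r :=
      pv_insert_eq_self r b (v b) hnd (h b (List.mem_cons_self))
    show pvRow v L (r.insert b (v b)) = r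
    rw [hb]
    exact ih r hnd (fun x hx => h x (List.mem_cons_of_mem _ hx))

theorem pv_nodup_pvRow (v : String → Int) (L : List String) (r : PySem.Dict String Int)
    (h : r.keys.Nodup) : (pvRow v L r).keys.Nodup :=
  PySem.Dict.nodup_keys_foldl_insert L (fun _ b => v b) r h

-- the A-side per-pair body simplifies to a single insert
theorem pv_stepPair_eq (d : PySem.Dict String (PySem.Dict String Int)) (a b : String) :
    (let d' := if d.contains a then d else d.insert a PySem.Dict.empty
     d'.insert a ((d'.getD a PySem.Dict.empty).insert b
       (if pvScript.get? a == pvScript.get? b then (1 : Int) else 0)))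
    = d.insert a ((d.getD a PySem.Dict.empty).insert b (pvVal a b)) := by
  by_cases hc : d.contains a
  · simp [hc, pvVal, pvSg]
  · have hc' : d.contains a = false := by simpa using hc
    rw [if_neg (by simp [hc'])]
    show (d.insert a PySem.Dict.empty).insert a
        (((d.insert a PySem.Dict.empty).getD a PySem.Dict.empty).insert b
          (if pvScript.get? a == pvScript.get? b then (1 : Int) else 0))
      = d.insert a ((d.getD a PySem.Dict.empty).insert b (pvVal a b))
    rw [PySem.Dict.getD_insert_self, PySem.Dict.insert_insert_self,
      PySem.Dict.getD_of_not_contains d _ hc']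
    rfl

-- the inner for-loop over lang2 collapses to one insert of an updated row
theorem pv_inner_eq (a : String) :
    ∀ (L : List String) (d : PySem.Dict String (PySem.Dict String Int)), L ≠ [] →
      L.foldl (fun d b => d.insert a ((d.getD a PySem.Dict.empty).insert b (pvVal a b))) d
        = d.insert a (pvRow (pvVal a) L (d.getD a PySem.Dict.empty)) := by
  intro L
  induction L with
  | nil => intro d h; exact absurd rfl h
  | cons b L ih =>
    intro d _
    by_cases hL : L = []
    · subst hL; rfl
    · simp only [List.foldl_cons]
      rw [ih _ hL, PySem.Dict.getD_insert_self, PySem.Dict.insert_insert_self]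
      rfl

-- under Pre_, updating an already-complete target row is the identity
theorem pv_insert_target (L : List String) (d : PySem.Dict String (PySem.Dict String Int))
    (a : String)
    (hinv : ∀ k w, d.get? k = some w → w = pvTarget L k) :
    d.insert a (pvRow (pvVal a) L (d.getD a PySem.Dict.empty)) = d.insert a (pvTarget L a) := by
  cases h : d.get? a with
  | none =>
    rw [PySem.Dict.getD_eq_get?_getD, h]; rfl
  | some w =>
    have hw : w = pvTarget L a := hinv a w h
    rw [PySem.Dict.getD_eq_get?_getD, h]
    simp only [Option.getD_some]
    subst hw
    congr 1
    apply pv_pvRow_idem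
    · exact pv_nodup_pvRow _ _ _ (by simp [PySem.Dict.keys_empty])
    · intro b hb
      rw [pvTarget, pv_get?_pvRow]
      simp [hb]

-- the outer accumulation: every key present maps to its target row
theorem pv_outer_main (L : List String) :
    ∀ (m : List String) (d : PySem.Dict String (PySem.Dict String Int)),
      d.keys.Nodup → (∀ k w, d.get? k = some w → w = pvTarget L k) →
      (m.foldl (fun d a => d.insert a (pvRow (pvVal a) L (d.getD a PySem.Dict.empty))) d).get?
        = fun k => if k ∈ m then some (pvTarget L k) else d.get? k := by
  intro m
  induction m with
  | nil => intro d _ _; funext k; simp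
  | cons a m ih =>
    intro d hnd hinv
    funext k
    simp only [List.foldl_cons]
    rw [pv_insert_target L d a hinv]
    have hnd' : (d.insert a (pvTarget L a)).keys.Nodup := PySem.Dict.nodup_keys_insert _ _ _ hnd
    have hinv' : ∀ k w, (d.insert a (pvTarget L a)).get? k = some w → w = pvTarget L k := by
      intro k w h
      by_cases hk : k = a
      · subst hk; rw [PySem.Dict.get?_insert_self] at h; exact (Option.some_inj.mp h).symm
      · rw [PySem.Dict.get?_insert_of_ne _ _ hk] at h; exact hinv k w h
    rw [ih _ hnd' hinv']
    by_cases hm : k ∈ m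
    · simp [hm]
    · by_cases hk : k = a
      · subst hk; simp [hm, PySem.Dict.get?_insert_self]
      · simp [hm, hk, PySem.Dict.get?_insert_of_ne _ _ hk]

-- foldl over a flatMap is a nested foldl
theorem pv_foldl_flatMap {α β γ : Type} (g : α → List γ) (f : β → γ → β) :
    ∀ (l : List α) (d : β),
      (l.flatMap g).foldl f d = l.foldl (fun d a => (g a).foldl f d) d := by
  intro l
  induction l with
  | nil => intro d; rfl
  | cons a l ih => intro d; simp only [List.flatMap_cons, List.foldl_append, ih, List.foldl_cons]

-- pointwise: one fixed LTR (resp. RTL) language makes the pairwise value the template value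
theorem pv_val_LTR (a b : String) (ha : pvScript.get? a = some "LTR") :
    pvVal a b = if pvScript.get? b == some "LTR" then (1 : Int) else 0 := by
  unfold pvVal pvSg
  rw [ha]
  cases h : pvScript.get? b with
  | none => simp
  | some s =>
    by_cases hs : s = "LTR"
    · subst hs; rfl
    · rw [beq_eq_false_iff_ne.mpr (fun h => hs (Option.some.inj h).symm),
        beq_eq_false_iff_ne.mpr (fun h => hs (Option.some.inj h))]

theorem pv_val_RTL (a b : String) (ha : pvScript.get? a = some "RTL") :
    pvVal a b = if pvScript.get? b == some "RTL" then (1 : Int) else 0 := by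
  unfold pvVal pvSg
  rw [ha]
  cases h : pvScript.get? b with
  | none => simp
  | some s =>
    by_cases hs : s = "RTL"
    · subst hs; rfl
    · rw [beq_eq_false_iff_ne.mpr (fun h => hs (Option.some.inj h).symm),
        beq_eq_false_iff_ne.mpr (fun h => hs (Option.some.inj h))]

-- under Pre_, the pairwise row for a equals the matching template row
theorem pv_target_eq_template (L : List String) (a : String)
    (ha : pvSg a = some "LTR" ∨ pvSg a = some "RTL") :
    pvTarget L a
      = (if pvScript.get? a == some "LTR"
          then L.foldl (fun r x => r.insert x (if pvScript.get? x == some "LTR" then (1 : Int) else 0)) PySem.Dict.empty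
          else L.foldl (fun r x => r.insert x (if pvScript.get? x == some "RTL" then (1 : Int) else 0)) PySem.Dict.empty) := by
  rcases ha with ha | ha
  · have ha' : pvScript.get? a = some "LTR" := ha
    rw [ha', if_pos (by decide)]
    unfold pvTarget pvRow
    congr 1
    funext r b
    rw [pv_val_LTR a b ha']
  · have ha' : pvScript.get? a = some "RTL" := ha
    rw [ha', if_neg (by decide)]
    unfold pvTarget pvRow
    congr 1
    funext r b
    rw [pv_val_RTL a b ha']

-- ===== VERDICT (by name: the statement is the Claim_ definition above) =====
theorem get_lang2lang_lr_dict_spec : Claim_equal_get_lang2lang_lr_dict := by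
  intro L _ hpre
  unfold Spec_get_lang2lang_lr_dict get_lang2lang_lr_dict get_lang2lang_lr_dict_alt
  dsimp only
  cases hL : L with
  | nil => rfl
  | cons a0 rest =>
  rw [← hL]
  have hne : L ≠ [] := by simp [hL]
  -- reshape A's fold over the pair list into the canonical outer fold
  have hA :
      (L.flatMap (fun a => L.map (fun b => (a, b)))).foldl
        (fun (d : PySem.Dict String (PySem.Dict String Int)) (p : String × String) =>
          let d := if d.contains p.1 then d else d.insert p.1 PySem.Dict.empty
          d.insert p.1 ((d.getD p.1 PySem.Dict.empty).insert p.2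
            (if pvScript.get? p.1 == pvScript.get? p.2 then (1 : Int) else 0)))
        PySem.Dict.empty
      = L.foldl (fun d a => d.insert a (pvRow (pvVal a) L (d.getD a PySem.Dict.empty)))
          PySem.Dict.empty := by
    rw [pv_foldl_flatMap]
    congr 1
    funext d a
    rw [List.foldl_map]
    have hbody :
        (fun (d : PySem.Dict String (PySem.Dict String Int)) (b : String) =>
          let d' := if d.contains a then d else d.insert a PySem.Dict.empty
          d'.insert a ((d'.getD a PySem.Dict.empty).insert b
            (if pvScript.get? a == pvScript.get? b then (1 : Int) else 0)))
        = fun d b => d.insert a ((d.getD a PySem.Dict.empty).insert b (pvVal a b)) := by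
      funext d b; exact pv_stepPair_eq d a b
    rw [hbody, pv_inner_eq a L d hne]
  rw [hA]
  -- both sides are foldl-insert loops over L from empty; compare items via keys + lookups
  set dA := L.foldl (fun d a => d.insert a (pvRow (pvVal a) L (d.getD a PySem.Dict.empty)))
      PySem.Dict.empty with hdA
  set choose := fun x =>
      if pvScript.get? x == some "LTR"
        then L.foldl (fun r x => r.insert x (if pvScript.get? x == some "LTR" then (1 : Int) else 0)) PySem.Dict.empty
        else L.foldl (fun r x => r.insert x (if pvScript.get? x == some "RTL" then (1 : Int) else 0)) PySem.Dict.empty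
    with hchoose
  set dB := L.foldl (fun d x => d.insert x (choose x)) PySem.Dict.empty with hdB
  have hemptyNodup : (PySem.Dict.empty : PySem.Dict String (PySem.Dict String Int)).keys.Nodup := by
    simp [PySem.Dict.keys_empty]
  have hAget : dA.get? = fun k => if k ∈ L then some (pvTarget L k) else none := by
    rw [hdA, pv_outer_main L L PySem.Dict.empty hemptyNodup (by intro k w h; simp [PySem.Dict.get?_empty] at h)]
    funext k; simp [PySem.Dict.get?_empty]
  have hBget : ∀ k, dB.get? k = if k ∈ L then some (choose k) else none := by
    intro k
    rw [hdB, pv_get?_foldl_insert_fn choose L PySem.Dict.empty k]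
    simp [PySem.Dict.get?_empty]
  have hAnodup : dA.keys.Nodup :=
    PySem.Dict.nodup_keys_foldl_insert L _ PySem.Dict.empty hemptyNodup
  have hBnodup : dB.keys.Nodup :=
    PySem.Dict.nodup_keys_foldl_insert L _ PySem.Dict.empty hemptyNodup
  have hAkeys : dA.keys = PySem.Set.update (PySem.Dict.empty : PySem.Dict String (PySem.Dict String Int)).keys L :=
    PySem.Dict.keys_foldl_insert L _ PySem.Dict.empty
  have hBkeys : dB.keys = PySem.Set.update (PySem.Dict.empty : PySem.Dict String (PySem.Dict String Int)).keys L :=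
    PySem.Dict.keys_foldl_insert L _ PySem.Dict.empty
  have hkeys : dA.keys = dB.keys := hAkeys.trans hBkeys.symm
  have hmem : ∀ k ∈ dA.keys, k ∈ L := by
    intro k hk
    rw [hAkeys] at hk
    simpa [PySem.Dict.keys_empty, PySem.Set.update_nil_left, PySem.Set.mem_ofList] using hk
  have hdict : dA = dB := by
    apply PySem.Dict.ext
    rw [PySem.Dict.items_eq_map_keys dA hAnodup PySem.Dict.empty,
      PySem.Dict.items_eq_map_keys dB hBnodup PySem.Dict.empty, hkeys]
    apply List.map_congr_left
    intro k hk
    have hkL : k ∈ L := hmem k (hkeys ▸ hk)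
    have h1 : dA.getD k PySem.Dict.empty = pvTarget L k := by
      rw [PySem.Dict.getD_eq_get?_getD, hAget]; simp [hkL]
    have h2 : dB.getD k PySem.Dict.empty = choose k := by
      rw [PySem.Dict.getD_eq_get?_getD, hBget]; simp [hkL]
    rw [h1, h2, pv_target_eq_template L k (hpre k hkL)]
  rw [hdict]
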